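-- pv_equiv track=rewrite | github.com/ecdraayer/DC-TSS | utils.py | _partition_from_cps
-- ===== SOURCE A (Python) =====
-- def _partition_from_cps(locations, n_obs):
--     '''
--     Return a list of sets that give a partition of the set [0, T-1], as
--     defined by the change point locations.
--     Author: G.J.J. van den Burg (https://github.com/alan-turing-institute/TCPDBench)
--     Examples
--     -----------
--     >>> _partition_from_cps([], 5)
--     [{0, 1, 2, 3, 4}]
--     >>> _partition_from_cps([3, 5], 8)
--     [{0, 1, 2}, {3, 4}, {5, 6, 7}]
--     >>> _partition_from_cps([1,2,7], 8)
--     [{0}, {1}, {2, 3, 4, 5, 6}, {7}]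
--     >>> _partition_from_cps([0, 4], 6)
--     [{0, 1, 2, 3}, {4, 5}]
--     '''
--     T = n_obs
--     partition = []
--     current = set()
--
--     all_cps = iter(sorted(set(locations)))
--     cp = next(all_cps, None)
--     for i in range(T):
--         if i == cp:
--             if current:
--                 partition.append(current)
--             current = set()
--             cp = next(all_cps, None)
--         current.add(i)
--     partition.append(current)
--     return partition
-- ===== SOURCE B (Python) =====
-- def _partition_from_cps(locations, n_obs):
--     cuts = []
--     for c in sorted(set(locations)):
--         if not (0 <= c < n_obs):
--             break
--         cuts.append(c)
--     bounds = [0] + cuts + [n_obs]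
--     return [set(range(a, b)) for a, b in zip(bounds, bounds[1:]) if a < b]
-- ===== Notes on version B (the rewrite author's own statement) =====
-- stated objective: simpler
-- what changed: B computes the in-range cut boundaries once (take-while over sorted(set(locations))), forms bounds = [0]+cuts+[n_obs], and materializes each non-empty segment as set(range(a,b)), instead of A's per-index scan that grows a set while tracking an iterator of change points.
-- intended difference: For n_obs <= 0 A returns [set()] (a 'partition' containing an empty set), while B returns [], the correct empty partition of an empty index set. — e.g. on _partition_from_cps([], 0): A returns [[]], B returns []
import Mathlib
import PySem

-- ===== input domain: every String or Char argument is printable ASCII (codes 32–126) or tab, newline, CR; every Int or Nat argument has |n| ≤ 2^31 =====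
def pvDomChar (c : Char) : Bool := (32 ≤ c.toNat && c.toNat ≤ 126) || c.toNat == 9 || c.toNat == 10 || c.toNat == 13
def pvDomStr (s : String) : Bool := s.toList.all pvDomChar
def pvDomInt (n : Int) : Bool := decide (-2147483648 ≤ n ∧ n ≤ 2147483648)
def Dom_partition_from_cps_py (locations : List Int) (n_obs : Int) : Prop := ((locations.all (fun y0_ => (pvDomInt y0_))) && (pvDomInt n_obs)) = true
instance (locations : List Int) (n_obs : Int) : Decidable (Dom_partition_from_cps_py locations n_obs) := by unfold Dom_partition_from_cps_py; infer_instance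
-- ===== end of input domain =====

-- B builds the partition from segment boundaries ([0]+cuts+[n_obs]) instead of A's per-index scan;
-- for n_obs ≤ 0, A returns [∅] while B returns the empty partition (see D_ below).


-- ===== PORT A =====
-- loop body: state = (partition, current, remaining change points); cp = head of the list, None = empty list
def aStep (st : List (List Int) × List Int × List Int) (i : Int) : List (List Int) × List Int × List Int :=
  match st with
  | (part, cur, cps) =>
    if cps.head? = some i then
      ((if cur = [] then part else part ++ [cur]), PySem.Set.add PySem.Set.empty i, cps.tail)
    else (part, PySem.Set.add cur i, cps)

def partition_from_cps_py (locations : List Int) (n_obs : Int) : List (List Int) :=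
  let all_cps := PySem.List.sorted (PySem.Set.ofList locations) (fun x => x) false
  let st := (PySem.List.pyRange 0 n_obs 1).foldl aStep ([], PySem.Set.empty, all_cps)
  st.1 ++ [st.2.1]

-- ===== PORT B =====
-- take-while: the in-range prefix of the sorted distinct change points
def takeCuts (n_obs : Int) : List Int → List Int
  | [] => []
  | c :: rest => if 0 ≤ c ∧ c < n_obs then c :: takeCuts n_obs rest else []

def partition_from_cps_py_alt (locations : List Int) (n_obs : Int) : List (List Int) :=
  let cuts := takeCuts n_obs (PySem.List.sorted (PySem.Set.ofList locations) (fun x => x) false)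
  let bounds := 0 :: (cuts ++ [n_obs])
  ((bounds.zip bounds.tail).filter (fun p => p.1 < p.2)).map
    (fun p => PySem.Set.ofList (PySem.List.pyRange p.1 p.2 1))

-- ===== PRECONDITION & SPEC =====
-- For n_obs ≤ 0 A returns [set()] (a 'partition' containing an empty set), while B returns [],
-- the correct empty partition of an empty index set.
def D_partition_from_cps_py (locations : List Int) (n_obs : Int) : Prop := n_obs ≤ 0
instance (locations : List Int) (n_obs : Int) : Decidable (D_partition_from_cps_py locations n_obs) := by unfold D_partition_from_cps_py; infer_instance

def Spec_partition_from_cps_py (locations : List Int) (n_obs : Int) (out : List (List Int)) : Prop := ¬ D_partition_from_cps_py locations n_obs → out = partition_from_cps_py_alt locations n_obs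
instance (locations : List Int) (n_obs : Int) (out : List (List Int)) : Decidable (Spec_partition_from_cps_py locations n_obs out) := by unfold Spec_partition_from_cps_py; infer_instance

def pvDiffWitness_partition_from_cps_py : List Int × Int := ([], 0)
def pvDiffWitnessOut_partition_from_cps_py : (List (List Int)) × (List (List Int)) := ([[]], [])

-- ===== CLAIM (what is proved, stated in full; the proofs are below) =====
def Claim_unchanged_partition_from_cps_py : Prop := ∀ (locations : List Int) (n_obs : Int), Dom_partition_from_cps_py locations n_obs → Spec_partition_from_cps_py locations n_obs (partition_from_cps_py locations n_obs)
def Claim_changed_partition_from_cps_py : Prop := Dom_partition_from_cps_py (pvDiffWitness_partition_from_cps_py.1) (pvDiffWitness_partition_from_cps_py.2) ∧ D_partition_from_cps_py (pvDiffWitness_partition_from_cps_py.1) (pvDiffWitness_partition_from_cps_py.2) ∧ partition_from_cps_py (pvDiffWitness_partition_from_cps_py.1) (pvDiffWitness_partition_from_cps_py.2) = pvDiffWitnessOut_partition_from_cps_py.1 ∧ partition_from_cps_py_alt (pvDiffWitness_partition_from_cps_py.1) (pvDiffWitness_partition_from_cps_py.2) = pvDiffWitnessOut_partition_from_cps_py.2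 ∧ pvDiffWitnessOut_partition_from_cps_py.1 ≠ pvDiffWitnessOut_partition_from_cps_py.2
def Claim_exact_partition_from_cps_py : Prop := ∀ (locations : List Int) (n_obs : Int), Dom_partition_from_cps_py locations n_obs → D_partition_from_cps_py locations n_obs → partition_from_cps_py locations n_obs ≠ partition_from_cps_py_alt locations n_obs

-- ===== LEMMAS AND PROOFS =====

-- proof-only companion of takeCuts: the dropped suffix
def dropCuts (n_obs : Int) : List Int → List Int
  | [] => []
  | c :: rest => if 0 ≤ c ∧ c < n_obs then dropCuts n_obs rest else c :: rest

lemma takeCuts_append_dropCuts (n : Int) (l : List Int) :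
    takeCuts n l ++ dropCuts n l = l := by
  induction l with
  | nil => rfl
  | cons c rest ih => by_cases h : 0 ≤ c ∧ c < n <;> simp [takeCuts, dropCuts, h, ih]

lemma mem_takeCuts (n : Int) (l : List Int) (c : Int) (h : c ∈ takeCuts n l) :
    0 ≤ c ∧ c < n := by
  induction l with
  | nil => simp [takeCuts] at h
  | cons x rest ih =>
    by_cases hx : 0 ≤ x ∧ x < n
    · simp [takeCuts, hx] at h
      rcases h with h | h
      · exact h ▸ hx
      · exact ih h
    · simp [takeCuts, hx] at h

lemma dropCuts_head? (n : Int) (l : List Int) (h : Int)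
    (hh : (dropCuts n l).head? = some h) : h < 0 ∨ n ≤ h := by
  induction l with
  | nil => simp [dropCuts] at hh
  | cons x rest ih =>
    by_cases hx : 0 ≤ x ∧ x < n
    · exact ih (by simpa [dropCuts, hx] using hh)
    · simp [dropCuts, hx] at hh
      omega

lemma takeCuts_of_nonpos (n : Int) (hn : n ≤ 0) (l : List Int) :
    takeCuts n l = [] := by
  cases l with
  | nil => rfl
  | cons c rest =>
    have : ¬ (0 ≤ c ∧ c < n) := by omega
    simp [takeCuts, this]

-- a block [a, b) during which the current change point never matches:
-- partition and change points stay, current collects the whole block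
lemma aStep_block (a b : Int) (part : List (List Int)) (cur cps : List Int)
    (hcur : ∀ x ∈ cur, x < a)
    (hcps : ∀ h, cps.head? = some h → h < a ∨ b ≤ h) :
    (PySem.List.pyRange a b 1).foldl aStep (part, cur, cps)
      = (part, cur ++ PySem.List.pyRange a b 1, cps) := by
  by_cases hab : b ≤ a
  · simp [PySem.List.pyRange_one_eq_nil hab]
  · have hlt : a < b := by omega
    rw [PySem.List.pyRange_one_cons hlt]
    have hne : ¬ cps.head? = some a := by
      intro hc
      rcases hcps a hc with h | h <;> omega
    have hnm : a ∉ cur := fun hm => absurd (hcur a hm) (by omega)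
    have hstep : aStep (part, cur, cps) a = (part, cur ++ [a], cps) := by
      simp [aStep, hne, PySem.Set.add_of_not_mem hnm]
    rw [List.foldl_cons, hstep,
        aStep_block (a + 1) b part (cur ++ [a]) cps
          (by intro x hx; rcases List.mem_append.mp hx with h | h
              · exact lt_trans (hcur x h) (by omega)
              · simp at h; omega)
          (by intro h hh; rcases hcps h hh with h1 | h1 <;> omega),
        List.append_assoc, List.singleton_append]
termination_by (b - a).toNat
decreasing_by omega

-- the segments A produces from position a onward, given current set `cur` and remaining cuts
def segsA (n : Int) (cur : List Int) (a : Int) : List Int → List (List Int)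
  | [] => [cur ++ PySem.List.pyRange a n 1]
  | c :: cs =>
      (if cur ++ PySem.List.pyRange a c 1 = [] then []
       else [cur ++ PySem.List.pyRange a c 1]) ++ segsA n [c] (c + 1) cs

lemma aStep_main (n : Int) (cuts : List Int) : ∀ (rest : List Int) (a : Int)
    (part : List (List Int)) (cur : List Int),
    0 ≤ a →
    cuts.Pairwise (· < ·) →
    (∀ c ∈ cuts, a ≤ c ∧ c < n) →
    (∀ h, rest.head? = some h → h < 0 ∨ n ≤ h) →
    (∀ x ∈ cur, x < a) →
    ((PySem.List.pyRange a n 1).foldl aStep (part, cur, cuts ++ rest)).1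
      ++ [((PySem.List.pyRange a n 1).foldl aStep (part, cur, cuts ++ rest)).2.1]
      = part ++ segsA n cur a cuts := by
  induction cuts with
  | nil =>
    intro rest a part cur ha _ _ hrest hcur
    simp only [List.nil_append]
    rw [aStep_block a n part cur rest hcur
        (fun h hh => by rcases hrest h hh with h1 | h1 <;> omega)]
    simp [segsA]
  | cons c cs ih =>
    intro rest a part cur ha hpw hin hrest hcur
    have hc := hin c (by simp)
    have hsplit : PySem.List.pyRange a n 1
        = PySem.List.pyRange a c 1 ++ PySem.List.pyRange c n 1 :=
      PySem.List.pyRange_one_append a c n hc.1 (by omega)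
    rw [hsplit, List.foldl_append]
    rw [aStep_block a c part cur ((c :: cs) ++ rest) hcur
        (by intro h hh; simp at hh; omega)]
    rw [PySem.List.pyRange_one_cons hc.2, List.foldl_cons]
    have hstep : aStep (part, cur ++ PySem.List.pyRange a c 1, (c :: cs) ++ rest) c
        = ((if cur ++ PySem.List.pyRange a c 1 = [] then part
            else part ++ [cur ++ PySem.List.pyRange a c 1]), [c], cs ++ rest) := by
      simp [aStep, PySem.Set.empty]
    rw [hstep]
    rw [ih rest (c + 1)
        (if cur ++ PySem.List.pyRange a c 1 = [] then part
         else part ++ [cur ++ PySem.List.pyRange a c 1]) [c]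
        (by omega) (List.Pairwise.of_cons hpw)
        (by intro x hx
            have h1 := (List.pairwise_cons.mp hpw).1 x hx
            have h2 := hin x (by simp [hx])
            omega)
        hrest
        (by intro x hx; simp at hx; omega)]
    simp only [segsA]
    split <;> simp

-- B's zip/filter/map expression, segment by segment (recursive case: after a cut c)
lemma segsA_zip (n : Int) (cs : List Int) : ∀ (c : Int), c < n →
    (∀ x ∈ cs, c < x ∧ x < n) → cs.Pairwise (· < ·) →
    segsA n [c] (c + 1) cs =
      (((c :: (cs ++ [n])).zip (cs ++ [n])).filter (fun p => p.1 < p.2)).map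
        (fun p => PySem.Set.ofList (PySem.List.pyRange p.1 p.2 1)) := by
  induction cs with
  | nil =>
    intro c hc _ _
    have hstep : ([c] : List Int) ++ PySem.List.pyRange (c + 1) n 1
        = PySem.List.pyRange c n 1 := by
      rw [PySem.List.pyRange_one_cons hc]; rfl
    simp [segsA, hstep, hc,
          PySem.Set.ofList_eq_self_of_nodup _ (PySem.List.nodup_pyRange_one c n)]
  | cons c2 cs' ih =>
    intro c hc hin hpw
    have hc2 := hin c2 (by simp)
    have hstep : ([c] : List Int) ++ PySem.List.pyRange (c + 1) c2 1
        = PySem.List.pyRange c c2 1 := by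
      rw [PySem.List.pyRange_one_cons hc2.1]; rfl
    simp only [segsA, hstep]
    have hne : PySem.List.pyRange c c2 1 ≠ [] := by
      rw [PySem.List.pyRange_one_cons hc2.1]; simp
    rw [if_neg hne]
    rw [ih c2 hc2.2
        (by intro x hx
            have h1 := (List.pairwise_cons.mp hpw).1 x hx
            have h2 := hin x (by simp [hx]); omega)
        (List.Pairwise.of_cons hpw)]
    simp [hc2.1,
          PySem.Set.ofList_eq_self_of_nodup _ (PySem.List.nodup_pyRange_one c c2)]

-- B's zip/filter/map expression from the start (bounds 0 :: cuts ++ [n])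
lemma segsA_zip_top (n : Int) (cuts : List Int) (hn : 0 < n)
    (hin : ∀ c ∈ cuts, 0 ≤ c ∧ c < n) (hpw : cuts.Pairwise (· < ·)) :
    segsA n [] 0 cuts =
      (((0 :: (cuts ++ [n])).zip (cuts ++ [n])).filter (fun p => p.1 < p.2)).map
        (fun p => PySem.Set.ofList (PySem.List.pyRange p.1 p.2 1)) := by
  cases cuts with
  | nil =>
    simp [segsA, List.filter, hn,
          PySem.Set.ofList_eq_self_of_nodup _ (PySem.List.nodup_pyRange_one 0 n)]
  | cons c cs =>
    have hc := hin c (by simp)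
    have hrec := segsA_zip n cs c hc.2
        (by intro x hx
            have h1 := (List.pairwise_cons.mp hpw).1 x hx
            have h2 := hin x (by simp [hx]); omega)
        (List.Pairwise.of_cons hpw)
    simp only [segsA, hrec]
    by_cases h0 : 0 < c
    · have hne : ([] : List Int) ++ PySem.List.pyRange 0 c 1 ≠ [] := by
        rw [List.nil_append, PySem.List.pyRange_one_cons h0]; simp
      rw [if_neg hne]
      simp [h0,
            PySem.Set.ofList_eq_self_of_nodup _ (PySem.List.nodup_pyRange_one 0 c)]
    · have hceq : c = 0 := by omega
      have hnil : ([] : List Int) ++ PySem.List.pyRange 0 c 1 = [] := by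
        rw [List.nil_append, PySem.List.pyRange_one_eq_nil (by omega)]
      rw [if_pos hnil]
      simp [hceq]

-- ===== VERDICT (by name: the statement is the Claim_ definition above) =====
theorem partition_from_cps_py_spec : Claim_unchanged_partition_from_cps_py := by
  intro locations n hdom hD
  simp only [D_partition_from_cps_py] at hD
  have hn : 0 < n := by omega
  unfold partition_from_cps_py partition_from_cps_py_alt
  simp only [PySem.Set.empty, List.tail_cons]
  set s := PySem.List.sorted (PySem.Set.ofList locations) (fun x => x) false with hs
  have hpw : s.Pairwise (· < ·) := PySem.List.sorted_ofList_pairwise_lt locations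
  have hdec := takeCuts_append_dropCuts n s
  have hpw2 : (takeCuts n s ++ dropCuts n s).Pairwise (· < ·) := hdec.symm ▸ hpw
  have hpwcuts : (takeCuts n s).Pairwise (· < ·) := (List.pairwise_append.mp hpw2).1
  have hmain := aStep_main n (takeCuts n s) (dropCuts n s) 0 [] []
      (le_refl 0) hpwcuts (fun c hc => mem_takeCuts n s c hc)
      (fun h hh => dropCuts_head? n s h hh)
      (by intro x hx; simp at hx)
  rw [hdec] at hmain
  rw [hmain, segsA_zip_top n (takeCuts n s) hn (fun c hc => mem_takeCuts n s c hc) hpwcuts]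
  simp

theorem partition_from_cps_py_changed : Claim_changed_partition_from_cps_py := by
  unfold Claim_changed_partition_from_cps_py; decide

theorem partition_from_cps_py_tight : Claim_exact_partition_from_cps_py := by
  intro locations n _ hD
  unfold D_partition_from_cps_py at hD
  unfold partition_from_cps_py partition_from_cps_py_alt
  rw [takeCuts_of_nonpos n hD, PySem.List.pyRange_one_eq_nil hD]
  have : ¬ (0 : Int) < n := by omega
  simp [List.filter, this]
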